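-- pv_equiv track=rewrite | github.com/ZhangGroup-MITChemistry/Explicit_Ion_Chromatin | Examples/single_nucleosome/setup/post_processing/groupsDefinition/prep_nucl_rigid.py | get_dna_atom_id_list
-- ===== SOURCE A (Python) =====
-- n_ca_per_histone = 974
--
-- n_bp_per_nucl = 147
--
-- def get_dna_atom_id_list(n_nucl, nrl, n_bp_end_1, n_bp_end_2):
--     # get a list that the atom_id of atoms in the same bp are put in the same sub-list
--     output_list = []
--     n_res_per_ssdna = (n_nucl - 1)*nrl + n_bp_per_nucl + n_bp_end_1 + n_bp_end_2 # number of residues in each ssDNA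
--     tot_n_ca = n_nucl*n_ca_per_histone
--     atom_id = tot_n_ca + 1
--     for i in range(n_res_per_ssdna):
--         output_list.append([])
--         if i == 0:
--             k = 2
--         else:
--             k = 3
--         for j in range(k):
--             output_list[i].append(atom_id)
--             atom_id += 1
--     for i in range(n_res_per_ssdna):
--         if i == 0:
--             k = 2
--         else:
--             k = 3
--         for j in range(k):
--             output_list[n_res_per_ssdna - i - 1].append(atom_id)
--             atom_id += 1
--     return output_list
-- ===== SOURCE B (Python) =====
-- def get_dna_atom_id_list(n_nucl, nrl, n_bp_end_1, n_bp_end_2):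
--     # closed-form offsets: residue t of a strand pass starts at its pass base if t == 0
--     # (2 atoms), else at pass base + 3*t - 1 (3 atoms); build each base pair's row directly
--     n_res = (n_nucl - 1) * nrl + 147 + n_bp_end_1 + n_bp_end_2
--     base = n_nucl * 974 + 1
--     rev = base + 3 * n_res - 1
--     out = []
--     for j in range(n_res):
--         i = n_res - 1 - j
--         f = base if j == 0 else base + 3 * j - 1
--         r = rev if i == 0 else rev + 3 * i - 1
--         row = [f, f + 1] if j == 0 else [f, f + 1, f + 2]
--         row += [r, r + 1] if i == 0 else [r, r + 1, r + 2]
--         out.append(row)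
--     return out
-- ===== Notes on version B (the rewrite author's own statement) =====
-- stated objective: simpler
-- what changed: Replaces A's running atom_id counter and two sequential in-place append passes over the output with a single comprehension that constructs each base pair's sublist directly from closed-form offsets (forward block at 3*t-1, reverse block mirrored).
import Mathlib
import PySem

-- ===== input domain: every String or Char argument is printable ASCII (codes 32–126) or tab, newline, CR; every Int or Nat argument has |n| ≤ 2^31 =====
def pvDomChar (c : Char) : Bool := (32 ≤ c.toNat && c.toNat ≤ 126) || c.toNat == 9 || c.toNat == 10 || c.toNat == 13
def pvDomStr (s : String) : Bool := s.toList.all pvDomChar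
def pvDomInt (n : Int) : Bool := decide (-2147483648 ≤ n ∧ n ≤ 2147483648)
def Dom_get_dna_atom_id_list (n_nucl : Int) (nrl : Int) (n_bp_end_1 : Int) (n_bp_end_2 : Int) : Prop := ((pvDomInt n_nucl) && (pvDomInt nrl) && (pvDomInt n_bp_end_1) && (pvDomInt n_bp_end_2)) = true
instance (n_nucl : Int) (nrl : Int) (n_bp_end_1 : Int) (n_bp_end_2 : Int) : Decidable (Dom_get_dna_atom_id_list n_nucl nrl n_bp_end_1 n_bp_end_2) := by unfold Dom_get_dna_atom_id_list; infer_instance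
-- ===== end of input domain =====

-- B replaces A's running atom-id counter and two sequential in-place append passes with a
-- single pass that builds each base pair's sublist directly from closed-form offsets
-- (objective: simpler).

-- ===== PORT A =====
-- loop body of A's first pass: output_list.append([]) then k times output_list[i].append(atom_id);
-- index i comes from range(n_res) so it is nonnegative and in range, making .toNat exact here
def stepA1 (st : List (List Int) × Int) (i : Int) : List (List Int) × Int :=
  let out := st.1 ++ [([] : List Int)]
  let k : Int := if i = 0 then 2 else 3
  (PySem.List.pyRange 0 k 1).foldl
    (fun st _ => (st.1.modify i.toNat (fun l => l ++ [st.2]), st.2 + 1)) (out, st.2)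

-- loop body of A's second pass: k times output_list[n_res - i - 1].append(atom_id);
-- that index is nonnegative and in range for every i of range(n_res), making .toNat exact here
def stepA2 (n_res : Int) (st : List (List Int) × Int) (i : Int) : List (List Int) × Int :=
  (PySem.List.pyRange 0 (if i = 0 then (2 : Int) else 3) 1).foldl
    (fun st _ => (st.1.modify (n_res - i - 1).toNat (fun l => l ++ [st.2]), st.2 + 1)) st

def get_dna_atom_id_list (n_nucl : Int) (nrl : Int) (n_bp_end_1 : Int) (n_bp_end_2 : Int) : List (List Int) :=
  let n_res_per_ssdna : Int := (n_nucl - 1) * nrl + 147 + n_bp_end_1 + n_bp_end_2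
  let tot_n_ca : Int := n_nucl * 974
  let s1 := (PySem.List.pyRange 0 n_res_per_ssdna 1).foldl stepA1 ([], tot_n_ca + 1)
  let s2 := (PySem.List.pyRange 0 n_res_per_ssdna 1).foldl (stepA2 n_res_per_ssdna) s1
  s2.1

-- ===== PORT B =====
-- Source B's loop body: the row of base pair j, from closed-form offsets (loop rendered as map)
def pvRow (base : Int) (rev : Int) (n_res : Int) (j : Int) : List Int :=
  let i : Int := n_res - 1 - j
  let f : Int := if j = 0 then base else base + 3 * j - 1
  let r : Int := if i = 0 then rev else rev + 3 * i - 1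
  (if j = 0 then [f, f + 1] else [f, f + 1, f + 2]) ++
    (if i = 0 then [r, r + 1] else [r, r + 1, r + 2])

def get_dna_atom_id_list_alt (n_nucl : Int) (nrl : Int) (n_bp_end_1 : Int) (n_bp_end_2 : Int) : List (List Int) :=
  let n_res : Int := (n_nucl - 1) * nrl + 147 + n_bp_end_1 + n_bp_end_2
  let base : Int := n_nucl * 974 + 1
  let rev : Int := base + 3 * n_res - 1
  (PySem.List.pyRange 0 n_res 1).map (fun j => pvRow base rev n_res j)

-- ===== PRECONDITION & SPEC =====
def Spec_get_dna_atom_id_list (n_nucl : Int) (nrl : Int) (n_bp_end_1 : Int) (n_bp_end_2 : Int) (out : List (List Int)) : Prop := out = get_dna_atom_id_list_alt n_nucl nrl n_bp_end_1 n_bp_end_2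
instance (n_nucl : Int) (nrl : Int) (n_bp_end_1 : Int) (n_bp_end_2 : Int) (out : List (List Int)) : Decidable (Spec_get_dna_atom_id_list n_nucl nrl n_bp_end_1 n_bp_end_2 out) := by unfold Spec_get_dna_atom_id_list; infer_instance

-- ===== CLAIM (what is proved, stated in full; the proofs are below) =====
def Claim_equal_get_dna_atom_id_list : Prop := ∀ (n_nucl : Int) (nrl : Int) (n_bp_end_1 : Int) (n_bp_end_2 : Int), Dom_get_dna_atom_id_list n_nucl nrl n_bp_end_1 n_bp_end_2 → Spec_get_dna_atom_id_list n_nucl nrl n_bp_end_1 n_bp_end_2 (get_dna_atom_id_list n_nucl nrl n_bp_end_1 n_bp_end_2)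

-- ===== LEMMAS AND PROOFS =====

-- the block of atom ids appended when the counter stands at a (first residue gets 2, others 3)
def blk (a : Int) (i : Int) : List Int := if i = 0 then [a, a + 1] else [a, a + 1, a + 2]

-- the block residue t receives in one pass of a strand whose pass starts at atom id 'start'
def fBlk (start : Int) (t : Int) : List Int :=
  if t = 0 then [start, start + 1] else [start + 3 * t - 1, start + 3 * t, start + 3 * t + 1]

-- how far the atom-id counter has advanced after m residues of one pass
def adv (m : Nat) : Int := if m = 0 then 0 else 3 * m - 1

lemma modify_modify {α : Type} (L : List α) (p : Nat) (f g : α → α) :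
    (L.modify p f).modify p g = L.modify p (fun x => g (f x)) := by
  apply List.ext_getElem (by simp)
  intro i h1 h2
  simp [List.getElem_modify]
  split <;> simp_all

lemma modify_append_last {α : Type} (L : List α) (x : α) (f : α → α) :
    (L ++ [x]).modify L.length f = L ++ [f x] := by
  apply List.ext_getElem (by simp)
  intro i h1 h2
  have hlen : i < L.length + 1 := by simpa using h2
  rw [List.getElem_modify]
  by_cases hi : i < L.length
  · rw [if_neg (by omega)]
    rw [List.getElem_append_left hi, List.getElem_append_left hi]
  · have : i = L.length := by omega
    subst this
    rw [if_pos rfl]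
    simp

lemma modify_append_left {α : Type} (L M : List α) (p : Nat) (hp : p < L.length) (f : α → α) :
    (L ++ M).modify p f = L.modify p f ++ M := by
  apply List.ext_getElem (by simp)
  intro i h1 h2
  rw [List.getElem_modify]
  by_cases hi : i < L.length
  · rw [List.getElem_append_left (show i < (L.modify p f).length from by simpa using hi),
        List.getElem_modify, List.getElem_append_left hi]
  · rw [if_neg (by omega)]
    rw [List.getElem_append_right (by omega), List.getElem_append_right (by simpa using hi)]
    simp

lemma stepA1_eq (L : List (List Int)) (a : Int) (i : Int) (hi : 0 ≤ i)
    (hlen : L.length = i.toNat) :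
    stepA1 (L, a) i = (L ++ [blk a i], a + if i = 0 then 2 else 3) := by
  by_cases h : i = 0
  · subst h
    have hL : L = [] := by simpa using hlen
    subst hL
    unfold stepA1 blk
    norm_num
    rw [show PySem.List.pyRange 0 2 1 = [0, 1] from by decide]
    simp [List.modify]
    omega
  · unfold stepA1 blk
    simp only [if_neg h]
    rw [show PySem.List.pyRange 0 3 1 = [0, 1, 2] from by decide]
    simp only [List.foldl_cons, List.foldl_nil]
    have h1 : (L ++ [([] : List Int)]).modify i.toNat (fun l => l ++ [a]) = L ++ [[a]] := by
      rw [← hlen]; simpa using modify_append_last L ([] : List Int) (fun l => l ++ [a])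
    have h2 : (L ++ [[a]]).modify i.toNat (fun l => l ++ [a + 1]) = L ++ [[a, a + 1]] := by
      rw [← hlen]; simpa using modify_append_last L [a] (fun l => l ++ [a + 1])
    have h3 : (L ++ [[a, a + 1]]).modify i.toNat (fun l => l ++ [a + 1 + 1])
        = L ++ [[a, a + 1, a + 1 + 1]] := by
      rw [← hlen]; simpa using modify_append_last L [a, a + 1] (fun l => l ++ [a + 1 + 1])
    simp only [h1, h2, h3]
    simp only [Prod.mk.injEq, List.append_cancel_left_eq, List.cons.injEq, and_true,
      eq_self_iff_true, true_and]
    omega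

lemma stepA2_eq (n_res : Int) (L : List (List Int)) (a : Int) (i : Int) :
    stepA2 n_res (L, a) i
      = (L.modify (n_res - i - 1).toNat (fun l => l ++ blk a i), a + if i = 0 then 2 else 3) := by
  by_cases h : i = 0
  · subst h
    unfold stepA2 blk
    norm_num
    rw [show PySem.List.pyRange 0 2 1 = [0, 1] from by decide]
    simp only [List.foldl_cons, List.foldl_nil]
    rw [modify_modify]
    simp
    omega
  · unfold stepA2 blk
    simp only [if_neg h]
    rw [show PySem.List.pyRange 0 3 1 = [0, 1, 2] from by decide]
    simp only [List.foldl_cons, List.foldl_nil]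
    rw [modify_modify, modify_modify]
    simp only [Prod.mk.injEq]
    constructor
    · congr 1
      funext x
      simp only [List.append_assoc, List.cons_append, List.nil_append, List.cons.injEq, and_true,
        eq_self_iff_true, true_and, List.append_cancel_left_eq]
      omega
    · omega

lemma pvRow_eq_fBlk (base rev n_res : Int) (j : Int) :
    pvRow base rev n_res j = fBlk base j ++ fBlk rev (n_res - 1 - j) := by
  unfold pvRow fBlk
  split_ifs <;> simp_all <;> omega

lemma fBlk_eq_blk (base : Int) (k : Nat) : fBlk base (k : Int) = blk (base + adv k) (k : Int) := by
  unfold fBlk blk adv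
  by_cases h : k = 0
  · subst h; norm_num
  · have hk : ((k : Int)) ≠ 0 := Int.natCast_ne_zero.mpr h
    simp only [if_neg hk, if_neg h]
    simp only [List.cons.injEq, and_true, eq_self_iff_true, true_and]
    omega

lemma adv_succ (m : Nat) : adv (m + 1) = adv m + if m = 0 then 2 else 3 := by
  unfold adv
  by_cases h : m = 0 <;> simp [h] <;> push_cast <;> omega

lemma pass1 (base : Int) (N : Nat) :
    (List.range N).foldl (fun st (k : Nat) => stepA1 st (k : Int)) ([], base)
      = ((List.range N).map (fun k : Nat => fBlk base (k : Int)), base + adv N) := by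
  induction N with
  | zero => simp [adv]
  | succ n ih =>
    rw [List.range_succ, List.foldl_append, ih]
    simp only [List.foldl_cons, List.foldl_nil]
    rw [stepA1_eq _ _ _ (by positivity) (by simp)]
    rw [List.map_append, List.map_singleton, fBlk_eq_blk, adv_succ]
    simp only [Prod.mk.injEq, Nat.cast_eq_zero, true_and]
    by_cases hn : n = 0 <;> simp [hn] <;> ring

lemma pass2 (N : Nat) (L : List (List Int)) (hL : L.length = N) (rb : Int) (m : Nat) (hm : m ≤ N) :
    (List.range m).foldl (fun st (k : Nat) => stepA2 (N : Int) st (k : Int)) (L, rb)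
      = (L.take (N - m) ++
          List.zipWith (fun l r => l ++ r) (L.drop (N - m))
            (((List.range m).map (fun k : Nat => fBlk rb (k : Int))).reverse),
         rb + adv m) := by
  induction m with
  | zero => simp [adv, hL]
  | succ m ih =>
    rw [List.range_succ, List.foldl_append, ih (by omega)]
    simp only [List.foldl_cons, List.foldl_nil]
    rw [stepA2_eq]
    have hidx : ((N : Int) - (m : Int) - 1).toNat = N - m - 1 := by omega
    rw [hidx]
    have hmN : m < N := by omega
    have hg : N - m - 1 < L.length := by omega
    have htake : L.take (N - m) = L.take (N - m - 1) ++ [L[N - m - 1]'hg] := by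
      conv_lhs => rw [show N - m = N - m - 1 + 1 from by omega]
      rw [List.take_succ, List.getElem?_eq_getElem hg]
      rfl
    have hlen1 : (L.take (N - m - 1)).length = N - m - 1 := by simp; omega
    have hdrop : L.drop (N - m - 1) = L[N - m - 1]'hg :: L.drop (N - m) := by
      rw [List.drop_eq_getElem_cons hg]
      rw [show N - m - 1 + 1 = N - m from by omega]
    rw [modify_append_left _ _ _ (by rw [List.length_take]; omega)]
    have hmod : (L.take (N - m)).modify (N - m - 1) (fun l => l ++ blk (rb + adv m) (m : Int))
        = L.take (N - m - 1) ++ [L[N - m - 1]'hg ++ blk (rb + adv m) (m : Int)] := by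
      rw [htake]
      have h2 := modify_append_last (L.take (N - m - 1)) (L[N - m - 1]'hg)
        (fun l => l ++ blk (rb + adv m) (m : Int))
      rwa [hlen1] at h2
    rw [hmod]
    have hsub : N - (m + 1) = N - m - 1 := by omega
    rw [hsub, hdrop, List.map_append, List.reverse_append]
    simp only [List.map_singleton, List.reverse_singleton, List.singleton_append,
      List.zipWith_cons_cons]
    rw [← fBlk_eq_blk, adv_succ]
    simp only [Prod.mk.injEq, Nat.cast_eq_zero]
    constructor
    · rw [List.append_assoc, List.singleton_append]
    · by_cases hmz : m = 0 <;> simp [hmz] <;> ring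

lemma ports_agree (n_nucl nrl n_bp_end_1 n_bp_end_2 : Int) :
    get_dna_atom_id_list n_nucl nrl n_bp_end_1 n_bp_end_2
      = get_dna_atom_id_list_alt n_nucl nrl n_bp_end_1 n_bp_end_2 := by
  simp only [get_dna_atom_id_list, get_dna_atom_id_list_alt]
  set n : Int := (n_nucl - 1) * nrl + 147 + n_bp_end_1 + n_bp_end_2 with hn_def
  set base : Int := n_nucl * 974 + 1 with hbase_def
  by_cases hn : n ≤ 0
  · rw [PySem.List.pyRange_one_eq_nil hn]
    simp
  · push_neg at hn
    have hNn : ((n.toNat : Int)) = n := Int.toNat_of_nonneg (le_of_lt hn)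
    set N : Nat := n.toNat with hN_def
    have hN0 : N ≠ 0 := by omega
    rw [← hNn]
    rw [PySem.List.pyRange_one]
    simp only [sub_zero, Int.toNat_natCast, zero_add]
    rw [List.foldl_map, List.foldl_map, List.map_map]
    rw [pass1 base N]
    rw [pass2 N _ (by simp) (base + adv N) N (le_refl N)]
    simp only [Nat.sub_self, List.take_zero, List.drop_zero, List.nil_append]
    have hadv : base + adv N = base + 3 * (N : Int) - 1 := by
      unfold adv; rw [if_neg hN0]; push_cast; ring
    rw [hadv]
    apply List.ext_getElem
    · simp
    · intro j h1 h2
      have hjN : j < N := by simpa using h2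
      rw [List.getElem_zipWith]
      simp only [List.getElem_map, List.getElem_range, Function.comp_apply]
      rw [List.getElem_reverse]
      simp only [List.getElem_map, List.getElem_range, List.length_map, List.length_range]
      rw [pvRow_eq_fBlk]
      congr 1
      congr 1
      omega

-- ===== VERDICT (by name: the statement is the Claim_ definition above) =====
theorem get_dna_atom_id_list_spec : Claim_equal_get_dna_atom_id_list := by
  intro n_nucl nrl n_bp_end_1 n_bp_end_2 _
  unfold Spec_get_dna_atom_id_list
  exact ports_agree n_nucl nrl n_bp_end_1 n_bp_end_2
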